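-- pv_equiv track=rewrite | github.com/llevaachingada/rbassist | rbassist/playlist_expand.py | _playlist_path_segments
-- ===== SOURCE A (Python) =====
-- def _playlist_path_segments(playlist_path: str | None) -> list[str]:
--     if not playlist_path:
--         return []
--     text = str(playlist_path).strip().strip("\\/")
--     if not text:
--         return []
--     for sep in ("\\", "/"):
--         text = text.replace(sep, "/")
--     return [segment for segment in text.split("/") if segment]
-- ===== SOURCE B (Python) =====
-- def _playlist_path_segments(playlist_path):
--     if not playlist_path:
--         return []
--     text = str(playlist_path).strip()
--     result = []
--     buf = []
--     for ch in text:
--         if ch == '\\' or ch == '/':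
--             if buf:
--                 result.append(''.join(buf))
--                 buf = []
--         else:
--             buf.append(ch)
--     if buf:
--         result.append(''.join(buf))
--     return result
-- ===== Notes on version B (the rewrite author's own statement) =====
-- stated objective: alternative
-- what changed: Replaced A's normalize pipeline (strip separators, replace backslashes, split on '/', filter empties) by a single character scan over the stripped string that maintains a current-segment buffer and flushes it at each separator.
import Mathlib
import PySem

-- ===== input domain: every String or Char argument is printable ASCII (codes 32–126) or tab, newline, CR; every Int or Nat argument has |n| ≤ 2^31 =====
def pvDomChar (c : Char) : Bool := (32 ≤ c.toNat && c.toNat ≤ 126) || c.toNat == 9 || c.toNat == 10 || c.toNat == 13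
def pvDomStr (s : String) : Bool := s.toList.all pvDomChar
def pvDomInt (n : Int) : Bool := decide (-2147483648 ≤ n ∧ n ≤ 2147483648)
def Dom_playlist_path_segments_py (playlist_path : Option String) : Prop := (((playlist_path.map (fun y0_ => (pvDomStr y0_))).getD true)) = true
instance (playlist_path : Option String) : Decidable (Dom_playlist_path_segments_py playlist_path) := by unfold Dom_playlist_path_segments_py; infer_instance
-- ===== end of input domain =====

-- B replaces A's strip/strip-seps/replace/split/filter pipeline by a single character scan
-- with a segment buffer (objective: alternative decomposition, same cost).

-- ===== PORT A =====
def playlist_path_segments_py (playlist_path : Option String) : List String :=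
  match playlist_path with
  | none => []
  | some s =>
    if s = "" then []                                    -- `if not playlist_path`
    else
      let text := PySem.Str.stripChars (PySem.Str.strip s) "\\/"
      if text = "" then []
      else
        let text1 := PySem.Str.replace text "\\" "/"     -- loop `for sep in ("\\", "/")`
        let text2 := PySem.Str.replace text1 "/" "/"
        -- str.split with a non-empty separator never raises; the getD [] is unreachable
        ((PySem.Str.split? text2 "/").getD []).filter (fun seg => seg != "")

-- ===== PORT B =====
def altStep (acc : List String × List Char) (ch : Char) : List String × List Char :=
  if ch = '\\' ∨ ch = '/' then
    if acc.2 = [] then acc else (acc.1 ++ [String.ofList acc.2], [])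
  else (acc.1, acc.2 ++ [ch])

def playlist_path_segments_py_alt (playlist_path : Option String) : List String :=
  match playlist_path with
  | none => []
  | some s =>
    if s = "" then []
    else
      let text := PySem.Str.strip s
      let st := text.toList.foldl altStep ([], [])
      if st.2 = [] then st.1 else st.1 ++ [String.ofList st.2]

-- ===== PRECONDITION & SPEC =====
def Spec_playlist_path_segments_py (playlist_path : Option String) (out : List String) : Prop := out = playlist_path_segments_py_alt playlist_path
instance (playlist_path : Option String) (out : List String) : Decidable (Spec_playlist_path_segments_py playlist_path out) := by unfold Spec_playlist_path_segments_py; infer_instance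

-- ===== CLAIM (what is proved, stated in full; the proofs are below) =====
def Claim_equal_playlist_path_segments_py : Prop := ∀ (playlist_path : Option String), Dom_playlist_path_segments_py playlist_path → Spec_playlist_path_segments_py playlist_path (playlist_path_segments_py playlist_path)

-- ===== LEMMAS AND PROOFS =====

-- reference tokenizer both ports are reduced to
def toks : List Char → List Char → List (List Char)
  | [], buf => if buf = [] then [] else [buf]
  | c :: cs, buf =>
    if c = '\\' ∨ c = '/' then (if buf = [] then toks cs [] else buf :: toks cs [])
    else toks cs (buf ++ [c])

-- pure form of Chars.splitOn at separator '/'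
def split1 : List Char → List Char → List (List Char)
  | [], cur => [cur.reverse]
  | c :: cs, cur => if c = '/' then cur.reverse :: split1 cs [] else split1 cs (c :: cur)

-- the character map of A's replace loop
def repF (c : Char) : Char := if c = '\\' then '/' else c

lemma rep_go_step (o n c : Char) (t acc : List Char) (fuel : Nat) :
    PySem.Chars.replace.go [o] [n] (fuel+1) (c :: t) acc
      = if c = o then PySem.Chars.replace.go [o] [n] fuel t (n :: acc)
        else PySem.Chars.replace.go [o] [n] fuel t (c :: acc) := by
  rw [PySem.Chars.replace.go]
  by_cases h : c = o
  · simp [h, List.isPrefixOf]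
  · simp [h, List.isPrefixOf, Ne.symm h]

lemma rep_go (o n : Char) : ∀ (fuel : Nat) (cs acc : List Char), cs.length ≤ fuel →
    PySem.Chars.replace.go [o] [n] fuel cs acc
      = acc.reverse ++ cs.map (fun c => if c = o then n else c) := by
  intro fuel
  induction fuel with
  | zero =>
    intro cs acc h
    have : cs = [] := by cases cs <;> simp_all
    subst this; simp [PySem.Chars.replace.go]
  | succ fuel ih =>
    intro cs acc h
    cases cs with
    | nil => simp [PySem.Chars.replace.go]
    | cons c t =>
      rw [rep_go_step]
      by_cases hc : c = o
      · rw [if_pos hc, ih t _ (by simpa using h)]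
        simp [hc]
      · rw [if_neg hc, ih t _ (by simpa using h)]
        simp [hc]

lemma replace_single (cs : List Char) (o n : Char) :
    PySem.Chars.replace cs [o] [n] = cs.map (fun c => if c = o then n else c) := by
  simpa [PySem.Chars.replace] using rep_go o n cs.length cs [] le_rfl

lemma split_go_step (c : Char) (t cur : List Char) (acc : List (List Char)) (fuel : Nat) :
    PySem.Chars.splitOn.go ['/'] (fuel+1) (c :: t) cur acc
      = if c = '/' then PySem.Chars.splitOn.go ['/'] fuel t [] (cur.reverse :: acc)
        else PySem.Chars.splitOn.go ['/'] fuel t (c :: cur) acc := by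
  rw [PySem.Chars.splitOn.go]
  by_cases h : c = '/'
  · simp [h, List.isPrefixOf]
  · simp [h, List.isPrefixOf, Ne.symm h]

lemma split_go : ∀ (fuel : Nat) (cs cur : List Char) (acc : List (List Char)), cs.length ≤ fuel →
    PySem.Chars.splitOn.go ['/'] fuel cs cur acc = acc.reverse ++ split1 cs cur := by
  intro fuel
  induction fuel with
  | zero =>
    intro cs cur acc h
    have : cs = [] := by cases cs <;> simp_all
    subst this; simp [PySem.Chars.splitOn.go, split1]
  | succ fuel ih =>
    intro cs cur acc h
    cases cs with
    | nil => simp [PySem.Chars.splitOn.go, split1]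
    | cons c t =>
      rw [split_go_step]
      by_cases hc : c = '/'
      · rw [if_pos hc, ih t [] _ (by simpa using h)]
        simp [split1, hc]
      · rw [if_neg hc, ih t (c :: cur) acc (by simpa using h)]
        simp [split1, hc]

lemma splitOn_single (cs : List Char) :
    PySem.Chars.splitOn cs ['/'] = split1 cs [] := by
  simpa [PySem.Chars.splitOn] using split_go (cs.length + 1) cs [] [] (by omega)

lemma map_id_slash (l : List Char) : l.map (fun c => if c = '/' then '/' else c) = l := by
  induction l with
  | nil => rfl
  | cons c t ih => by_cases h : c = '/' <;> simp [h, ih]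

lemma fs_toks : ∀ (cs buf : List Char),
    (split1 (cs.map repF) buf.reverse).filter (fun l => l != []) = toks cs buf := by
  intro cs
  induction cs with
  | nil =>
    intro buf
    by_cases h : buf = [] <;> simp [split1, toks, h]
  | cons c t ih =>
    intro buf
    by_cases hs : c = '\\' ∨ c = '/'
    · have hrep : repF c = '/' := by
        rcases hs with h | h <;> simp [repF, h]
      rw [List.map_cons, hrep, split1, if_pos rfl, List.reverse_reverse, List.filter_cons]
      by_cases hb : buf = []
      · subst hb
        simpa [toks, hs] using ih []
      · have h2 : (buf != []) = true := by simpa using hb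
        rw [h2, if_pos rfl]
        have := ih []
        simp only [List.reverse_nil] at this
        simp [toks, hs, hb, this]
    · have hc1 : c ≠ '\\' := fun h => hs (Or.inl h)
      have hc2 : c ≠ '/' := fun h => hs (Or.inr h)
      have hr : repF c = c := by simp [repF, hc1]
      rw [List.map_cons, hr, split1, if_neg hc2]
      have := ih (buf ++ [c])
      simp only [List.reverse_append, List.reverse_singleton, List.singleton_append] at this
      rw [this]
      simp [toks, hs]

lemma contains_iff_sep (c : Char) : (['\\', '/'].contains c) = true ↔ (c = '\\' ∨ c = '/') := by
  simp only [List.contains_cons, List.contains_nil, Bool.or_false, Bool.or_eq_true, beq_iff_eq]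

lemma toks_dropWhile (cs : List Char) :
    toks (cs.dropWhile (fun c => ['\\', '/'].contains c)) [] = toks cs [] := by
  induction cs with
  | nil => rfl
  | cons c t ih =>
    rw [List.dropWhile_cons]
    by_cases h : (['\\', '/'].contains c) = true
    · have hs := (contains_iff_sep c).mp h
      rw [if_pos h, ih]
      simp [toks, hs]
    · rw [if_neg h]

lemma toks_append_sep (c : Char) (hs : c = '\\' ∨ c = '/') :
    ∀ (cs buf : List Char), toks (cs ++ [c]) buf = toks cs buf := by
  intro cs
  induction cs with
  | nil =>
    intro buf
    by_cases hb : buf = [] <;> simp [toks, hs, hb]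
  | cons d t ih =>
    intro buf
    by_cases hd : d = '\\' ∨ d = '/' <;> simp [toks, hd, ih]

lemma toks_rev_dropWhile (ds : List Char) :
    toks (ds.dropWhile (fun c => ['\\', '/'].contains c)).reverse [] = toks ds.reverse [] := by
  induction ds with
  | nil => rfl
  | cons d t ih =>
    rw [List.dropWhile_cons, List.reverse_cons]
    by_cases h : (['\\', '/'].contains d) = true
    · rw [if_pos h, ih, toks_append_sep d ((contains_iff_sep d).mp h)]
    · rw [if_neg h, List.reverse_cons]

lemma toks_stripChars (cs : List Char) :
    toks (PySem.Chars.stripChars cs ['\\', '/']) [] = toks cs [] := by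
  simp only [PySem.Chars.stripChars]
  rw [toks_rev_dropWhile ((cs.dropWhile (fun c => ['\\', '/'].contains c)).reverse)]
  rw [List.reverse_reverse, toks_dropWhile]

lemma fold_toks : ∀ (cs : List Char) (res : List String) (buf : List Char),
    (let st := cs.foldl altStep (res, buf);
     if st.2 = [] then st.1 else st.1 ++ [String.ofList st.2])
      = res ++ (toks cs buf).map String.ofList := by
  intro cs
  induction cs with
  | nil =>
    intro res buf
    by_cases hb : buf = [] <;> simp [toks, hb]
  | cons c t ih =>
    intro res buf
    by_cases hs : c = '\\' ∨ c = '/'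
    · by_cases hb : buf = []
      · subst hb
        show (let st := t.foldl altStep (altStep (res, []) c);
          if st.2 = [] then st.1 else st.1 ++ [String.ofList st.2]) = _
        rw [show altStep (res, []) c = (res, []) by simp [altStep, hs]]
        simp [toks, hs, ih res []]
      · show (let st := t.foldl altStep (altStep (res, buf) c);
          if st.2 = [] then st.1 else st.1 ++ [String.ofList st.2]) = _
        rw [show altStep (res, buf) c = (res ++ [String.ofList buf], []) by
          simp [altStep, hs, hb]]
        simp [toks, hs, hb, ih (res ++ [String.ofList buf]) []]
    · show (let st := t.foldl altStep (altStep (res, buf) c);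
        if st.2 = [] then st.1 else st.1 ++ [String.ofList st.2]) = _
      rw [show altStep (res, buf) c = (res, buf ++ [c]) by simp [altStep, hs]]
      simp [toks, hs, ih res (buf ++ [c])]

lemma ofList_ne_empty_iff (l : List Char) : (String.ofList l != "") = (l != []) := by
  by_cases h : l = []
  · simp [h]
  · have h2 : String.ofList l ≠ "" := by
      intro hh
      have : (String.ofList l).toList = ("" : String).toList := by rw [hh]
      simp at this
      exact h this
    apply Bool.eq_iff_iff.mpr
    simp [h, h2]

lemma filter_map_ofList (ls : List (List Char)) :
    (ls.map String.ofList).filter (fun seg => seg != "")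
      = (ls.filter (fun l => l != [])).map String.ofList := by
  induction ls with
  | nil => rfl
  | cons l t ih =>
    rw [List.map_cons, List.filter_cons, List.filter_cons, ofList_ne_empty_iff]
    by_cases h : (l != []) = true
    · simp [h, ih]
    · simp [h, ih]

lemma stripChars_toList (s : String) :
    (PySem.Str.stripChars s "\\/").toList = PySem.Chars.stripChars s.toList ['\\', '/'] := by
  exact PySem.Str.toList_stripChars s "\\/"

-- ===== VERDICT (by name: the statement is the Claim_ definition above) =====
theorem playlist_path_segments_py_spec : Claim_equal_playlist_path_segments_py := by
  intro playlist_path _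
  unfold Spec_playlist_path_segments_py
  match playlist_path with
  | none => rfl
  | some s =>
    by_cases hs0 : s = ""
    · simp [playlist_path_segments_py, playlist_path_segments_py_alt, hs0]
    · simp only [playlist_path_segments_py, playlist_path_segments_py_alt, if_neg hs0]
      have hB : (let st := (PySem.Str.strip s).toList.foldl altStep ([], []);
          if st.2 = [] then st.1 else st.1 ++ [String.ofList st.2])
          = (toks (PySem.Str.strip s).toList []).map String.ofList := by
        simpa using fold_toks (PySem.Str.strip s).toList [] []
      set cs := (PySem.Str.strip s).toList with hcs
      by_cases htext : PySem.Str.stripChars (PySem.Str.strip s) "\\/" = ""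
      · -- A returns []; the separator-stripped text is empty, so B's scan finds no segment either
        have h1 : PySem.Chars.stripChars cs ['\\', '/'] = [] := by
          have := stripChars_toList (PySem.Str.strip s)
          rw [htext] at this
          simpa [hcs] using this.symm
        have h2 : toks cs [] = [] := by
          have := toks_stripChars cs
          rw [h1] at this
          simpa [toks] using this.symm
        simp only [if_pos htext]
        rw [hB, h2]
        rfl
      · simp only [if_neg htext]
        set t := PySem.Str.stripChars (PySem.Str.strip s) "\\/" with ht
        have htoks : toks t.toList [] = toks cs [] := by
          have h1 : t.toList = PySem.Chars.stripChars cs ['\\', '/'] := by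
            exact stripChars_toList (PySem.Str.strip s)
          rw [h1]; exact toks_stripChars cs
        have hrep : (PySem.Str.replace (PySem.Str.replace t "\\" "/") "/" "/").toList
            = t.toList.map repF := by
          rw [PySem.Str.toList_replace, PySem.Str.toList_replace]
          rw [show ("\\" : String).toList = ['\\'] from rfl,
              show ("/" : String).toList = ['/'] from rfl, replace_single]
          rw [replace_single, map_id_slash]
          rfl
        have hsplit : PySem.Str.split? (PySem.Str.replace (PySem.Str.replace t "\\" "/") "/" "/") "/"
            = some ((split1 (t.toList.map repF) []).map String.ofList) := by
          rw [PySem.Str.split?, PySem.Chars.split?]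
          rw [show ("/" : String).toList = ['/'] from rfl]
          rw [if_neg (by simp)]
          rw [hrep, splitOn_single]
          rfl
        rw [hsplit, hB, ← htoks]
        rw [Option.getD_some, filter_map_ofList]
        have := fs_toks t.toList []
        simp only [List.reverse_nil] at this
        rw [this]
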